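-- pv_equiv track=rewrite | github.com/maggielaughter/tester_school_dzien_6_v2 | devide_signs.py | split
-- ===== SOURCE A (Python) =====
-- def split(text,sep):
--     data=[]
--     word=''
--     for char in text.lower():
--         if char == sep:
--             data.append(word)
--             word=''
--         else:
--             word += char
--     data.append(word)
--     return data
-- ===== SOURCE B (Python) =====
-- def split(text, sep):
--     # Two-phase: collect separator positions, then slice between them.
--     t = text.lower()
--     cuts = [i for i, c in enumerate(t) if c == sep]
--     parts = []
--     start = 0
--     for p in cuts:
--         parts.append(t[start:p])
--         start = p + 1
--     parts.append(t[start:])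
--     return parts
-- ===== Notes on version B (the rewrite author's own statement) =====
-- stated objective: alternative
-- what changed: Replaces A's single char-by-char pass that accumulates the current word with a two-phase decomposition: first collect all separator positions via enumerate, then slice the lowercased text between consecutive positions.
import Mathlib
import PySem

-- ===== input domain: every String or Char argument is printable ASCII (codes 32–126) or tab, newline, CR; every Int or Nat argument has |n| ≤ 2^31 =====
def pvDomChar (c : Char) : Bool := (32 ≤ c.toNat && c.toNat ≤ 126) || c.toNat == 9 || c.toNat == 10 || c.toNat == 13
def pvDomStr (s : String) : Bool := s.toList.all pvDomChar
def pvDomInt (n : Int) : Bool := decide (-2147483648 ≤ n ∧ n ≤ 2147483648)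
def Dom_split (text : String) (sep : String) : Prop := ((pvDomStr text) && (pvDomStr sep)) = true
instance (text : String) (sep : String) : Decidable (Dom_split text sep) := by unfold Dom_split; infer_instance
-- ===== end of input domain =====

-- B replaces A's char-by-char accumulation with a two-phase pass (collect separator
-- positions, then slice between them); objective: alternative decomposition, same cost.

-- ===== PORT A =====
def split (text : String) (sep : String) : List String :=
  let s := (PySem.Chars.lower text.toList).foldl
    (fun (st : List String × List Char) c =>
      if String.ofList [c] = sep then (st.1 ++ [String.ofList st.2], []) else (st.1, st.2 ++ [c]))
    ([], [])
  s.1 ++ [String.ofList s.2]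

-- ===== PORT B =====
def split_alt (text : String) (sep : String) : List String :=
  let t := PySem.Chars.lower text.toList
  let cuts := (PySem.List.enumerate t 0).filterMap
    (fun pr => if String.ofList [pr.2] = sep then some pr.1 else none)
  let s := cuts.foldl
    (fun (st : List String × Int) p =>
      (st.1 ++ [String.ofList (PySem.List.slice t (some st.2) (some p))], p + 1))
    ([], 0)
  s.1 ++ [String.ofList (PySem.List.slice t (some s.2) none)]

-- ===== PRECONDITION & SPEC =====
def Spec_split (text : String) (sep : String) (out : List String) : Prop := out = split_alt text sep
instance (text : String) (sep : String) (out : List String) : Decidable (Spec_split text sep out) := by unfold Spec_split; infer_instance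

-- ===== CLAIM (what is proved, stated in full; the proofs are below) =====
def Claim_equal_split : Prop := ∀ (text : String) (sep : String), Dom_split text sep → Spec_split text sep (split text sep)

-- ===== LEMMAS AND PROOFS =====

-- reference splitter: list of chunks between separator characters
def pvSpl (sep : String) : List Char → List (List Char)
  | [] => [[]]
  | c :: cs => if String.ofList [c] = sep then [] :: pvSpl sep cs
               else (pvSpl sep cs).modifyHead (c :: ·)

def pvJoinFirst (w : List Char) : List (List Char) → List (List Char)
  | [] => [w]
  | x :: xs => (w ++ x) :: xs

theorem pvSpl_ne_nil (sep : String) (l : List Char) : pvSpl sep l ≠ [] := by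
  cases l with
  | nil => simp [pvSpl]
  | cons c cs =>
    simp only [pvSpl]
    split_ifs
    · simp
    · intro h
      have := pvSpl_ne_nil sep cs
      cases hr : pvSpl sep cs with
      | nil => exact this hr
      | cons x xs => rw [hr] at h; simp [List.modifyHead] at h

theorem pvJoinFirst_nil (r : List (List Char)) (h : r ≠ []) : pvJoinFirst [] r = r := by
  cases r with
  | nil => exact absurd rfl h
  | cons x xs => simp [pvJoinFirst]

theorem pvJoinFirst_snoc (w : List Char) (c : Char) (r : List (List Char)) (h : r ≠ []) :
    pvJoinFirst (w ++ [c]) r = pvJoinFirst w (r.modifyHead (c :: ·)) := by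
  cases r with
  | nil => exact absurd rfl h
  | cons x xs => simp [pvJoinFirst, List.modifyHead]

theorem pvA_loop (sep : String) (l : List Char) : ∀ (data : List String) (word : List Char),
    (l.foldl
        (fun (st : List String × List Char) c =>
          if String.ofList [c] = sep then (st.1 ++ [String.ofList st.2], []) else (st.1, st.2 ++ [c]))
        (data, word)).1
      ++ [String.ofList (l.foldl
        (fun (st : List String × List Char) c =>
          if String.ofList [c] = sep then (st.1 ++ [String.ofList st.2], []) else (st.1, st.2 ++ [c]))
        (data, word)).2]
    = data ++ (pvJoinFirst word (pvSpl sep l)).map String.ofList := by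
  induction l with
  | nil => intro data word; simp [pvSpl, pvJoinFirst]
  | cons c cs ih =>
    intro data word
    simp only [List.foldl_cons]
    by_cases hc : String.ofList [c] = sep
    · simp only [if_pos hc]
      rw [ih]
      simp only [pvSpl, if_pos hc]
      cases hr : pvSpl sep cs with
      | nil => exact absurd hr (pvSpl_ne_nil sep cs)
      | cons x xs => simp [pvJoinFirst]
    · simp only [if_neg hc]
      rw [ih]
      simp only [pvSpl, if_neg hc]
      rw [← pvJoinFirst_snoc _ _ _ (pvSpl_ne_nil sep cs)]

theorem pvB_loop (sep : String) (t : List Char) : ∀ (cs w : List Char) (s st : Nat),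
    t.drop st = w ++ cs → w.length = s - st → st ≤ s → ∀ (parts : List String),
    (((PySem.List.enumerate cs (s : Int)).filterMap
          (fun pr => if String.ofList [pr.2] = sep then some pr.1 else none)).foldl
        (fun (a : List String × Int) p =>
          (a.1 ++ [String.ofList (PySem.List.slice t (some a.2) (some p))], p + 1))
        (parts, (st : Int))).1
      ++ [String.ofList (PySem.List.slice t
          (some (((PySem.List.enumerate cs (s : Int)).filterMap
              (fun pr => if String.ofList [pr.2] = sep then some pr.1 else none)).foldl
            (fun (a : List String × Int) p =>
              (a.1 ++ [String.ofList (PySem.List.slice t (some a.2) (some p))], p + 1))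
            (parts, (st : Int))).2) none)]
    = parts ++ (pvJoinFirst w (pvSpl sep cs)).map String.ofList := by
  intro cs
  induction cs with
  | nil =>
    intro w s st h1 h2 h3 parts
    simp [PySem.List.enumerate, PySem.List.slice_from_natCast, h1, pvSpl, pvJoinFirst]
  | cons c cs' ih =>
    intro w s st h1 h2 h3 parts
    rw [PySem.List.enumerate_cons]
    simp only [List.filterMap_cons]
    by_cases hc : String.ofList [c] = sep
    · simp only [if_pos hc, List.foldl_cons]
      have hsl : PySem.List.slice t (some (st : Int)) (some (s : Int)) = w := by
        rw [PySem.List.slice_natCast, h1, ← h2]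
        exact List.take_left
      have hd : t.drop (s + 1) = cs' := by
        have h5 : (t.drop st).drop (w.length + 1) = t.drop (s + 1) := by
          rw [List.drop_drop]; congr 1; omega
        rw [← h5, h1, show w ++ c :: cs' = (w ++ [c]) ++ cs' by simp,
          show w.length + 1 = (w ++ [c]).length by simp]
        exact List.drop_left
      have key := ih [] (s + 1) (s + 1) (by simpa using hd) (by simp) (Nat.le_refl _)
        (parts ++ [String.ofList w])
      push_cast at key ⊢
      rw [hsl, key, pvJoinFirst_nil _ (pvSpl_ne_nil sep cs')]
      simp [pvSpl, if_pos hc, pvJoinFirst]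
    · simp only [if_neg hc]
      have key := ih (w ++ [c]) (s + 1) st
        (by rw [h1]; simp) (by simp; omega) (by omega) parts
      push_cast at key ⊢
      rw [key, pvJoinFirst_snoc _ _ _ (pvSpl_ne_nil sep cs')]
      simp [pvSpl, if_neg hc]

-- ===== VERDICT (by name: the statement is the Claim_ definition above) =====
theorem split_spec : Claim_equal_split := by
  intro text sep _
  unfold Spec_split
  simp only [split, split_alt]
  rw [pvA_loop]
  have hB := pvB_loop sep (PySem.Chars.lower text.toList) (PySem.Chars.lower text.toList)
    [] 0 0 (by simp) (by simp) (Nat.le_refl 0) []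
  push_cast at hB
  rw [hB]
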